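-- pv_equiv track=rewrite | github.com/amol-ship-it/agi-core | domains/arc/primitives.py | propagate_color_h
-- ===== SOURCE A (Python) =====
-- Grid = list[list[int]]
--
-- def propagate_color_h(grid: Grid) -> Grid:
--     """Extend non-zero colors rightward until hitting another non-zero cell."""
--     if not grid or not grid[0]:
--         return grid
--     h, w = len(grid), len(grid[0])
--     result = [row[:] for row in grid]
--     for r in range(h):
--         last_color = 0
--         for c in range(w):
--             if grid[r][c] != 0:
--                 last_color = grid[r][c]
--             elif last_color != 0:
--                 result[r][c] = last_color
--     return result
-- ===== SOURCE B (Python) =====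
-- def propagate_color_h(grid):
--     if not grid or not grid[0]:
--         return grid
--     w = len(grid[0])
--     out = []
--     for row in grid:
--         nz = [c for c in range(w) if row[c] != 0]
--         new = list(row)
--         for i, c in enumerate(nz):
--             end = nz[i + 1] if i + 1 < len(nz) else w
--             v = row[c]
--             for k in range(c + 1, end):
--                 new[k] = v
--         out.append(new)
--     return out
-- ===== Notes on version B (the rewrite author's own statement) =====
-- stated objective: alternative
-- what changed: B first computes, per row, the list of nonzero column indices and then fills the gap between each consecutive pair (and after the last one, up to the first-row width) with the left color, instead of A's cell-by-cell scan carrying a last_color state.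
import Mathlib
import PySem

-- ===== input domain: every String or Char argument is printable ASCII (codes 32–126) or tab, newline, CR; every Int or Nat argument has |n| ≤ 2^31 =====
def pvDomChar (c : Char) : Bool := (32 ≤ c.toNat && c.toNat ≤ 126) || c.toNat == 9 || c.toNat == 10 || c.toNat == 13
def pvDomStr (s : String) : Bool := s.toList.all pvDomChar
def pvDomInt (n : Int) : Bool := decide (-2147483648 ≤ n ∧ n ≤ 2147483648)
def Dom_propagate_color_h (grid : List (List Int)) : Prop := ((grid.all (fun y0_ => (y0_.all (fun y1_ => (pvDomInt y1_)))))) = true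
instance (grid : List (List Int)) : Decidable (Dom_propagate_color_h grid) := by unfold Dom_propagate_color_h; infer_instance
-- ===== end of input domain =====

-- B fills gaps between consecutive nonzero column indices (computed first per row) instead of
-- scanning every cell with a carried last_color; alternative decomposition, same cost.

-- ===== PORT A =====
-- A's inner loop over c in range(w): state = (last_color, result row); grid[r][c] is read
-- as row.getD c 0, exact under Pre_ (c < w ≤ row.length).
def pvRowA (row : List Int) (w : Nat) : Int × List Int :=
  (List.range w).foldl
    (fun st c =>
      let v := row.getD c 0
      if v ≠ 0 then (v, st.2)
      else if st.1 ≠ 0 then (st.1, st.2.set c st.1)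
      else st)
    (0, row)

def propagate_color_h (grid : List (List Int)) : List (List Int) :=
  if grid = [] ∨ grid.headD [] = [] then grid
  else
    let w := (grid.headD []).length
    grid.map (fun row => (pvRowA row w).2)

-- ===== PORT B =====
-- Source B's enumerate loop over nz with end = nz[i+1] or w, as structural recursion on nz.
def pvFillRuns (row : List Int) (w : Nat) : List Nat → List Int → List Int
  | [], new => new
  | c :: rest, new =>
    let e := rest.headD w
    let v := row.getD c 0
    pvFillRuns row w rest ((List.range' (c + 1) (e - (c + 1))).foldl (fun acc k => acc.set k v) new)

def propagate_color_h_alt (grid : List (List Int)) : List (List Int) :=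
  if grid = [] ∨ grid.headD [] = [] then grid
  else
    let w := (grid.headD []).length
    grid.map (fun row =>
      let nz := (List.range w).filter (fun c => row.getD c 0 ≠ 0)
      pvFillRuns row w nz row)

-- ===== PRECONDITION & SPEC =====
-- Pre_ excludes exactly the inputs on which Python A raises an IndexError: grids whose first
-- row is nonempty and some row is shorter than the first (A indexes every row at columns
-- 0..len(grid[0])-1).  B raises there too.
def Pre_propagate_color_h (grid : List (List Int)) : Prop :=
  ∀ row ∈ grid, (grid.headD []).length ≤ row.length
instance (grid : List (List Int)) : Decidable (Pre_propagate_color_h grid) := by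
  unfold Pre_propagate_color_h; infer_instance

def pvWitness_propagate_color_h : List (List Int) := [[1, 0, 0], [0, 2, 0]]

def Spec_propagate_color_h (grid : List (List Int)) (out : List (List Int)) : Prop := out = propagate_color_h_alt grid
instance (grid : List (List Int)) (out : List (List Int)) : Decidable (Spec_propagate_color_h grid out) := by unfold Spec_propagate_color_h; infer_instance

-- ===== CLAIM (what is proved, stated in full; the proofs are below) =====
def Claim_equal_propagate_color_h : Prop := ∀ (grid : List (List Int)), Dom_propagate_color_h grid → Pre_propagate_color_h grid → Spec_propagate_color_h grid (propagate_color_h grid)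

-- ===== LEMMAS AND PROOFS =====

-- the last nonzero value among row[0..k), 0 if none
def pvLastNZ (row : List Int) : Nat → Int
  | 0 => 0
  | k + 1 => if row.getD k 0 ≠ 0 then row.getD k 0 else pvLastNZ row k

lemma pvLastNZ_of_seg (row : List Int) :
    ∀ k c, c < k → row.getD c 0 ≠ 0 → (∀ j, c < j → j < k → row.getD j 0 = 0) →
      pvLastNZ row k = row.getD c 0 := by
  intro k
  induction k with
  | zero => intro c h; omega
  | succ k ih =>
    intro c hck hc hz
    by_cases hk : c = k
    · subst hk
      simp only [pvLastNZ]
      rw [if_pos hc]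
    · have hzk : row.getD k 0 = 0 := hz k (by omega) (by omega)
      simp only [pvLastNZ, hzk]
      simpa using ih c (by omega) hc (fun j h1 h2 => hz j h1 (by omega))

lemma pvLastNZ_zero (row : List Int) :
    ∀ k, (∀ j, j < k → row.getD j 0 = 0) → pvLastNZ row k = 0 := by
  intro k
  induction k with
  | zero => intro; rfl
  | succ k ih =>
    intro hz
    simp only [pvLastNZ, hz k (by omega)]
    simpa using ih (fun j hj => hz j (by omega))

lemma pv_exists_max_nz (row : List Int) :
    ∀ k, (∀ j, j < k → row.getD j 0 = 0) ∨
      ∃ c, c < k ∧ row.getD c 0 ≠ 0 ∧ ∀ j, c < j → j < k → row.getD j 0 = 0 := by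
  intro k
  induction k with
  | zero => left; omega
  | succ k ih =>
    by_cases hk : row.getD k 0 = 0
    · rcases ih with h | ⟨c, h1, h2, h3⟩
      · left; intro j hj
        by_cases hjk : j = k
        · subst hjk; exact hk
        · exact h j (by omega)
      · right; exact ⟨c, by omega, h2, fun j hj1 hj2 => by
          by_cases hjk : j = k
          · subst hjk; exact hk
          · exact h3 j hj1 (by omega)⟩
    · right; exact ⟨k, by omega, hk, by omega⟩

-- ---- A side ----

lemma pv_ite_shift (k w : Nat) (P : Prop) [Decidable P] (X Y : Int) (hk : k ≠ w) :
    (if k < w ∧ P then X else Y) = (if k < w + 1 ∧ P then X else Y) := by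
  by_cases hkw : k < w
  · by_cases hP : P
    · rw [if_pos ⟨hkw, hP⟩, if_pos ⟨by omega, hP⟩]
    · rw [if_neg (fun h => hP h.2), if_neg (fun h => hP h.2)]
  · rw [if_neg (fun h => hkw h.1), if_neg (fun h => absurd h.1 (by omega))]

lemma pvRowA_spec (row : List Int) :
    ∀ w, w ≤ row.length →
      (pvRowA row w).1 = pvLastNZ row w ∧
      (pvRowA row w).2.length = row.length ∧
      ∀ k, (pvRowA row w).2.getD k 0 =
        if k < w ∧ row.getD k 0 = 0 then pvLastNZ row k else row.getD k 0 := by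
  intro w
  induction w with
  | zero =>
    intro _
    refine ⟨rfl, rfl, fun k => ?_⟩
    simp [pvRowA]
  | succ w ih =>
    intro hw
    obtain ⟨ih1, ih2, ih3⟩ := ih (by omega)
    have hstep : pvRowA row (w + 1) =
        (if row.getD w 0 ≠ 0 then (row.getD w 0, (pvRowA row w).2)
         else if (pvRowA row w).1 ≠ 0 then
           ((pvRowA row w).1, (pvRowA row w).2.set w (pvRowA row w).1)
         else pvRowA row w) := by
      unfold pvRowA
      rw [List.range_succ, List.foldl_append]
      rfl
    have hLZ : pvLastNZ row (w + 1) =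
        if row.getD w 0 ≠ 0 then row.getD w 0 else pvLastNZ row w := rfl
    have hsetD : ∀ (l : List Int) (i : Nat) (v : Int) (k : Nat), k ≠ i →
        (l.set i v).getD k 0 = l.getD k 0 := by
      intro l i v k hki
      by_cases hklen : k < l.length
      · rw [List.getD_eq_getElem _ _ (by simpa using hklen),
          List.getD_eq_getElem _ _ hklen, List.getElem_set_ne (by omega)]
      · rw [List.getD_eq_default _ _ (by simpa using (not_lt.mp hklen)),
          List.getD_eq_default _ _ (not_lt.mp hklen)]
    by_cases hv : row.getD w 0 = 0
    · have hLZ' : pvLastNZ row (w + 1) = pvLastNZ row w := by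
        rw [hLZ, if_neg (not_not_intro hv)]
      by_cases hl : (pvRowA row w).1 = 0
      · -- value zero, no carried color: state unchanged
        have hstep2 : pvRowA row (w + 1) = pvRowA row w := by
          rw [hstep, if_neg (not_not_intro hv), if_neg (not_not_intro hl)]
        refine ⟨by rw [hstep2, ih1, hLZ'], by rw [hstep2]; exact ih2, fun k => ?_⟩
        rw [hstep2, ih3 k]
        by_cases hk : k = w
        · subst hk
          have hz : pvLastNZ row k = 0 := by rw [← ih1]; exact hl
          rw [if_neg (fun h => absurd h.1 (lt_irrefl k)),
            if_pos ⟨Nat.lt_succ_self k, hv⟩, hz, hv]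
        · exact pv_ite_shift k w _ _ _ hk
      · -- value zero, carried color: position w gets set to it
        have hstep2 : pvRowA row (w + 1) =
            ((pvRowA row w).1, (pvRowA row w).2.set w (pvRowA row w).1) := by
          rw [hstep, if_neg (not_not_intro hv), if_pos hl]
        refine ⟨?_, ?_, fun k => ?_⟩
        · rw [hstep2]
          show (pvRowA row w).1 = pvLastNZ row (w + 1)
          rw [ih1, hLZ']
        · rw [hstep2]
          show ((pvRowA row w).2.set w (pvRowA row w).1).length = row.length
          rw [List.length_set]; exact ih2
        · rw [hstep2]
          show ((pvRowA row w).2.set w (pvRowA row w).1).getD k 0 = _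
          by_cases hk : k = w
          · subst hk
            have hklen : k < ((pvRowA row k).2.set k (pvRowA row k).1).length := by
              rw [List.length_set, ih2]; omega
            rw [List.getD_eq_getElem _ _ hklen, List.getElem_set_self,
              if_pos ⟨Nat.lt_succ_self k, hv⟩, ih1]
          · rw [hsetD _ _ _ _ hk, ih3 k]
            exact pv_ite_shift k w _ _ _ hk
    · -- nonzero cell: carried color updated, row entry kept
      have hstep2 : pvRowA row (w + 1) = (row.getD w 0, (pvRowA row w).2) := by
        rw [hstep, if_pos hv]
      refine ⟨?_, ?_, fun k => ?_⟩
      · rw [hstep2]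
        show row.getD w 0 = pvLastNZ row (w + 1)
        rw [hLZ, if_pos hv]
      · rw [hstep2]; exact ih2
      · rw [hstep2]
        show (pvRowA row w).2.getD k 0 = _
        rw [ih3 k]
        by_cases hk : k = w
        · subst hk
          rw [if_neg (fun h => absurd h.1 (lt_irrefl k)),
            if_neg (fun h => absurd h.2 hv)]
        · exact pv_ite_shift k w _ _ _ hk

-- ---- B side ----

lemma pv_foldl_set_length (v : Int) :
    ∀ (l : List Nat) (new : List Int),
      (l.foldl (fun acc k => acc.set k v) new).length = new.length := by
  intro l
  induction l with
  | nil => intro new; rfl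
  | cons j t ih => intro new; simp [List.foldl_cons, ih]

lemma pv_foldl_set_getD (v : Int) :
    ∀ (l : List Nat) (new : List Int) (k : Nat),
      (l.foldl (fun acc j => acc.set j v) new).getD k 0 =
        if k ∈ l ∧ k < new.length then v else new.getD k 0 := by
  intro l
  induction l with
  | nil => intro new k; simp
  | cons j t ih =>
    intro new k
    simp only [List.foldl_cons]
    rw [ih, List.length_set]
    by_cases hkj : k = j
    · subst hkj
      by_cases hklen : k < new.length
      · by_cases hkt : k ∈ t
        · rw [if_pos ⟨hkt, hklen⟩, if_pos ⟨List.mem_cons_self, hklen⟩]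
        · rw [if_neg (fun h => hkt h.1), if_pos ⟨List.mem_cons_self, hklen⟩,
            List.getD_eq_getElem _ _ (by simpa using hklen), List.getElem_set_self]
      · have h1 : new.set k v = new := List.set_eq_of_length_le (not_lt.mp hklen)
        rw [h1, if_neg (fun h => hklen h.2), if_neg (fun h => hklen h.2)]
    · have hgd : (new.set j v).getD k 0 = new.getD k 0 := by
        by_cases hklen : k < new.length
        · rw [List.getD_eq_getElem _ _ (by simpa using hklen),
            List.getD_eq_getElem _ _ hklen, List.getElem_set_ne (by omega)]
        · rw [List.getD_eq_default _ _ (by simpa using (not_lt.mp hklen)),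
            List.getD_eq_default _ _ (not_lt.mp hklen)]
      by_cases hkt : k ∈ t
      · by_cases hklen : k < new.length
        · rw [if_pos ⟨hkt, hklen⟩, if_pos ⟨List.mem_cons_of_mem _ hkt, hklen⟩]
        · rw [if_neg (fun h => hklen h.2), if_neg (fun h => hklen h.2), hgd]
      · have hmem : k ∉ j :: t := fun h => (List.mem_cons.mp h).elim hkj hkt
        rw [if_neg (fun h => hkt h.1), if_neg (fun h => hmem h.1), hgd]

lemma pvFillRuns_length (row : List Int) (w : Nat) :
    ∀ nz new, (pvFillRuns row w nz new).length = new.length := by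
  intro nz
  induction nz with
  | nil => intro new; rfl
  | cons c rest ih => intro new; rw [pvFillRuns, ih, pv_foldl_set_length]

-- pvBetween w nz k = some c iff position k lies strictly inside the run started by c
def pvBetween (w : Nat) : List Nat → Nat → Option Nat
  | [], _ => none
  | c :: rest, k => if c < k ∧ k < rest.headD w then some c else pvBetween w rest k

lemma pvBetween_some (w : Nat) :
    ∀ nz k c, pvBetween w nz k = some c → c ∈ nz ∧ c < k := by
  intro nz
  induction nz with
  | nil => intro k c h; simp [pvBetween] at h
  | cons c0 rest ih =>
    intro k c h
    rw [pvBetween] at h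
    split_ifs at h with hc
    · cases h; exact ⟨List.mem_cons_self, hc.1⟩
    · obtain ⟨h1, h2⟩ := ih k c h
      exact ⟨List.mem_cons_of_mem _ h1, h2⟩

lemma pvBetween_some_iff (w : Nat) :
    ∀ nz, List.Pairwise (· < ·) nz → (∀ c ∈ nz, c < w) →
      ∀ k c, (pvBetween w nz k = some c ↔
        (c ∈ nz ∧ c < k ∧ k < w ∧ ∀ j ∈ nz, ¬(c < j ∧ j ≤ k))) := by
  intro nz
  induction nz with
  | nil => intro _ _ k c; simp [pvBetween]
  | cons c0 rest ih =>
    intro hs hw k c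
    have hs' : List.Pairwise (· < ·) rest := hs.of_cons
    have hlt : ∀ j ∈ rest, c0 < j := fun j hj => (List.pairwise_cons.mp hs).1 j hj
    have hw' : ∀ c ∈ rest, c < w := fun c hc => hw c (List.mem_cons_of_mem _ hc)
    have hheadle : ∀ j ∈ rest, rest.headD w ≤ j := by
      intro j hj
      rcases rest with _ | ⟨e, t⟩
      · simp at hj
      · rcases List.mem_cons.mp hj with h | h
        · simp [h]
        · exact le_of_lt ((List.pairwise_cons.mp hs').1 j h)
    have hheadw : rest.headD w ≤ w := by
      rcases rest with _ | ⟨e, t⟩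
      · simp
      · exact le_of_lt (hw' e (by simp))
    constructor
    · intro h
      rw [pvBetween] at h
      split_ifs at h with hc
      · cases h
        refine ⟨List.mem_cons_self, hc.1, by omega, ?_⟩
        intro j hj hcj
        rcases List.mem_cons.mp hj with hj | hj
        · omega
        · have := hheadle j hj
          omega
      · obtain ⟨h1, h2, h3, h4⟩ := (ih hs' hw' k c).mp h
        refine ⟨List.mem_cons_of_mem _ h1, h2, h3, ?_⟩
        intro j hj
        rcases List.mem_cons.mp hj with hj | hj
        · subst hj
          have : j < c := hlt c h1
          omega
        · exact h4 j hj
    · rintro ⟨h1, h2, h3, h4⟩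
      rw [pvBetween]
      rcases List.mem_cons.mp h1 with h1 | h1
      · subst h1
        have hke : k < rest.headD w := by
          rcases hr : rest with _ | ⟨e, t⟩
          · simpa using h3
          · have he1 := h4 e (by rw [hr]; exact List.mem_cons_of_mem _ List.mem_cons_self)
            have he2 : c < e := hlt e (by rw [hr]; exact List.mem_cons_self)
            simp only [List.headD_cons]
            omega
        rw [if_pos ⟨h2, hke⟩]
      · have hc0c : c0 < c := hlt c h1
        have hnot : ¬ (c0 < k ∧ k < rest.headD w) := by
          rintro ⟨_, hk2⟩
          have := hheadle c h1
          omega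
        rw [if_neg hnot]
        exact (ih hs' hw' k c).mpr ⟨h1, h2, h3, fun j hj => h4 j (List.mem_cons_of_mem _ hj)⟩

lemma pvFillRuns_getD (row : List Int) (w : Nat) :
    ∀ nz new, List.Pairwise (· < ·) nz → (∀ c ∈ nz, c < w) → w ≤ new.length →
      ∀ k, (pvFillRuns row w nz new).getD k 0 =
        match pvBetween w nz k with
        | some c => row.getD c 0
        | none => new.getD k 0 := by
  intro nz
  induction nz with
  | nil => intro new _ _ _ k; simp [pvFillRuns, pvBetween]
  | cons c rest ih =>
    intro new hs hw hlen k
    have hs' : List.Pairwise (· < ·) rest := hs.of_cons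
    have hw' : ∀ c ∈ rest, c < w := fun c hc => hw c (List.mem_cons_of_mem _ hc)
    have hheadle : ∀ j ∈ rest, rest.headD w ≤ j := by
      intro j hj
      rcases rest with _ | ⟨e, t⟩
      · simp at hj
      · rcases List.mem_cons.mp hj with h | h
        · simp [h]
        · exact le_of_lt ((List.pairwise_cons.mp hs').1 j h)
    have hew : rest.headD w ≤ w := by
      rcases rest with _ | ⟨e, t⟩
      · simp
      · exact le_of_lt (hw' e (by simp))
    have hunf : pvFillRuns row w (c :: rest) new =
        pvFillRuns row w rest
          ((List.range' (c + 1) (rest.headD w - (c + 1))).foldl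
            (fun acc k => acc.set k (row.getD c 0)) new) := rfl
    set new' := (List.range' (c + 1) (rest.headD w - (c + 1))).foldl
        (fun acc k => acc.set k (row.getD c 0)) new with hnew'
    have hlen' : new'.length = new.length := pv_foldl_set_length _ _ _
    have hnewk : ∀ k, new'.getD k 0 =
        if c < k ∧ k < rest.headD w ∧ k < new.length then row.getD c 0
        else new.getD k 0 := by
      intro k
      rw [hnew', pv_foldl_set_getD]
      by_cases hmem : k ∈ List.range' (c + 1) (rest.headD w - (c + 1))
      · have hb := List.mem_range'_1.mp hmem
        by_cases hklen : k < new.length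
        · rw [if_pos ⟨hmem, hklen⟩, if_pos ⟨by omega, by omega, hklen⟩]
        · rw [if_neg (fun h => hklen h.2), if_neg (fun h => hklen h.2.2)]
      · have hnot2 : ¬(c < k ∧ k < rest.headD w ∧ k < new.length) := by
          rintro ⟨ha, hb, _⟩
          exact hmem (List.mem_range'_1.mpr ⟨by omega, by omega⟩)
        rw [if_neg (fun h => hmem h.1), if_neg hnot2]
    rw [hunf, ih new' hs' hw' (by omega) k, pvBetween]
    by_cases hck : c < k ∧ k < rest.headD w
    · rw [if_pos hck]
      have hnone : pvBetween w rest k = none := by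
        cases hb : pvBetween w rest k with
        | none => rfl
        | some c' =>
          obtain ⟨hc1, hc2⟩ := pvBetween_some w rest k c' hb
          have := hheadle c' hc1
          omega
      rw [hnone]
      show new'.getD k 0 = row.getD c 0
      rw [hnewk k, if_pos ⟨hck.1, hck.2, by omega⟩]
    · rw [if_neg hck]
      cases hb : pvBetween w rest k with
      | some c' => rfl
      | none =>
        show new'.getD k 0 = new.getD k 0
        rw [hnewk k, if_neg (fun h => hck ⟨h.1, h.2.1⟩)]

-- ---- per-row equality ----

lemma pvRow_eq (row : List Int) (w : Nat) (hw : w ≤ row.length) :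
    pvFillRuns row w ((List.range w).filter (fun c => row.getD c 0 ≠ 0)) row
      = (pvRowA row w).2 := by
  set nz := (List.range w).filter (fun c => row.getD c 0 ≠ 0) with hnz
  have hs : List.Pairwise (· < ·) nz :=
    List.Pairwise.sublist List.filter_sublist List.pairwise_lt_range
  have hwmem : ∀ c ∈ nz, c < w := by
    intro c hc
    exact List.mem_range.mp (List.mem_of_mem_filter hc)
  have hmem : ∀ c, c ∈ nz ↔ (c < w ∧ row.getD c 0 ≠ 0) := by
    intro c
    rw [hnz]
    simp [List.mem_filter, List.mem_range]
  obtain ⟨_, ha2, ha3⟩ := pvRowA_spec row w hw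
  have hlenB : (pvFillRuns row w nz row).length = row.length := pvFillRuns_length _ _ _ _
  apply List.ext_getElem (by omega)
  intro k hk1 hk2
  have hBk := pvFillRuns_getD row w nz row hs hwmem hw k
  have hAk := ha3 k
  rw [List.getD_eq_getElem _ _ hk1] at hBk
  rw [List.getD_eq_getElem _ _ hk2] at hAk
  rw [hBk, hAk]
  have hkrow : k < row.length := by omega
  cases hb : pvBetween w nz k with
  | some c =>
    obtain ⟨h1, h2, h3, h4⟩ := (pvBetween_some_iff w nz hs hwmem k c).mp hb
    have hcnz : row.getD c 0 ≠ 0 := ((hmem c).mp h1).2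
    have hknz : row.getD k 0 = 0 := by
      by_contra hne
      exact h4 k ((hmem k).mpr ⟨h3, hne⟩) ⟨h2, le_refl _⟩
    have hseg : ∀ j, c < j → j < k → row.getD j 0 = 0 := by
      intro j hj1 hj2
      by_contra hne
      exact h4 j ((hmem j).mpr ⟨by omega, hne⟩) ⟨hj1, by omega⟩
    rw [if_pos ⟨h3, hknz⟩, pvLastNZ_of_seg row k c h2 hcnz hseg]
  | none =>
    by_cases hkw : k < w ∧ row.getD k 0 = 0
    · rw [if_pos hkw]
      rcases pv_exists_max_nz row k with hall | ⟨c, h1, h2, h3⟩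
      · rw [pvLastNZ_zero row k hall]; exact hkw.2
      · exfalso
        have hsome : pvBetween w nz k = some c := by
          apply (pvBetween_some_iff w nz hs hwmem k c).mpr
          refine ⟨(hmem c).mpr ⟨by omega, h2⟩, h1, hkw.1, ?_⟩
          rintro j hj ⟨hj1, hj2⟩
          obtain ⟨hjw, hjnz⟩ := (hmem j).mp hj
          by_cases hjk : j = k
          · subst hjk; exact hjnz hkw.2
          · exact hjnz (h3 j hj1 (by omega))
        rw [hsome] at hb; cases hb
    · rw [if_neg hkw]

-- ===== VERDICT (by name: the statement is the Claim_ definition above) =====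
theorem propagate_color_h_spec : Claim_equal_propagate_color_h := by
  intro grid _ hpre
  show propagate_color_h grid = propagate_color_h_alt grid
  unfold propagate_color_h propagate_color_h_alt
  by_cases hg : grid = [] ∨ grid.headD [] = []
  · rw [if_pos hg, if_pos hg]
  · rw [if_neg hg, if_neg hg]
    exact List.map_congr_left
      (fun row hrow => (pvRow_eq row (grid.headD []).length (hpre row hrow)).symm)
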